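-- pv_equiv track=rewrite | github.com/finnjclancy/indicator-percentiles | main.py | get_indicator_group_and_subgroup
-- ===== SOURCE A (Python) =====
-- INDICATOR_GROUPS = {
--     'RSI': ['RSI'],
--     'MACD': {
--         'MACD': ['MACD'],
--         'Signal': ['MACD_signal'],
--         'Histogram': ['MACD_diff']
--     },
--     'BB': {
--         'High': ['BB_high'],
--         'Mid': ['BB_mid'],
--         'Low': ['BB_low'],
--         'Width': ['BB_width']
--     },
--     'Stochastic': {
--         'K': ['Stoch_k'],
--         'D': ['Stoch_d'],
--         'Difference': ['Stoch_diff']  # New indicator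
--     },
--     'MA': {
--         'SMA': ['SMA_20', 'SMA_50', 'SMA_100', 'SMA_200'],
--         'EMA': ['EMA_20', 'EMA_50', 'EMA_100', 'EMA_200']
--     }
-- }
--
-- def get_indicator_group_and_subgroup(indicator):
--     """Get the group and subgroup name for a given indicator."""
--     for group_name, group in INDICATOR_GROUPS.items():
--         if isinstance(group, dict):
--             for subgroup_name, indicators in group.items():
--                 if indicator in indicators:
--                     return group_name, subgroup_name
--         elif indicator in group:
--             return group_name, None
--     return None, None
-- ===== SOURCE B (Python) =====
-- INDICATOR_GROUPS = {
--     'RSI': ['RSI'],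
--     'MACD': {
--         'MACD': ['MACD'],
--         'Signal': ['MACD_signal'],
--         'Histogram': ['MACD_diff']
--     },
--     'BB': {
--         'High': ['BB_high'],
--         'Mid': ['BB_mid'],
--         'Low': ['BB_low'],
--         'Width': ['BB_width']
--     },
--     'Stochastic': {
--         'K': ['Stoch_k'],
--         'D': ['Stoch_d'],
--         'Difference': ['Stoch_diff']
--     },
--     'MA': {
--         'SMA': ['SMA_20', 'SMA_50', 'SMA_100', 'SMA_200'],
--         'EMA': ['EMA_20', 'EMA_50', 'EMA_100', 'EMA_200']
--     }
-- }
--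
-- # Flat index built once at module load: indicator -> (group, subgroup)
-- _FLAT = {}
-- for _g, _grp in INDICATOR_GROUPS.items():
--     if isinstance(_grp, dict):
--         for _s, _inds in _grp.items():
--             for _i in _inds:
--                 _FLAT[_i] = (_g, _s)
--     else:
--         for _i in _grp:
--             _FLAT[_i] = (_g, None)
--
-- def get_indicator_group_and_subgroup(indicator):
--     """Get the group and subgroup name for a given indicator."""
--     return _FLAT.get(indicator, (None, None))
-- ===== Notes on version B (the rewrite author's own statement) =====
-- stated objective: simpler
-- what changed: Replaced the nested scan over the group/subgroup structure with a flat indicator->(group,subgroup) dict built once at module load, so the lookup is a single dict.get with a (None, None) default.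
import Mathlib
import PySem

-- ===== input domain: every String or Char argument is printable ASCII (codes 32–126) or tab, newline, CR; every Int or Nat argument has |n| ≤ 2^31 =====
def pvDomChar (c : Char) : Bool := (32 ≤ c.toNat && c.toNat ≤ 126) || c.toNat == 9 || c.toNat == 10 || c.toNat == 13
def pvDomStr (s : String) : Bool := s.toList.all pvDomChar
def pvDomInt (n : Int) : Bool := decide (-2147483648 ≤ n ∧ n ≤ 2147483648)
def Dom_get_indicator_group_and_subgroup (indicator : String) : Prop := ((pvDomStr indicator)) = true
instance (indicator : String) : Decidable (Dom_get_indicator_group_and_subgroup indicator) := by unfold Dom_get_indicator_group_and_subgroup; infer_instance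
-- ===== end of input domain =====

-- B replaces A's nested scan-and-branch over the group structure by a flat
-- indicator -> (group, subgroup) index built once, then a single keyed lookup
-- with a (none, none) default (objective: simpler).

-- ===== PORT A =====

-- a group's value is either a plain list of indicators or a dict subgroup -> indicators
inductive PyGroup where
  | flat   : List String → PyGroup
  | nested : List (String × List String) → PyGroup
deriving Repr, DecidableEq

def INDICATOR_GROUPS : List (String × PyGroup) :=
  [ ("RSI", .flat ["RSI"]),
    ("MACD", .nested [("MACD", ["MACD"]), ("Signal", ["MACD_signal"]), ("Histogram", ["MACD_diff"])]),
    ("BB", .nested [("High", ["BB_high"]), ("Mid", ["BB_mid"]), ("Low", ["BB_low"]), ("Width", ["BB_width"])]),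
    ("Stochastic", .nested [("K", ["Stoch_k"]), ("D", ["Stoch_d"]), ("Difference", ["Stoch_diff"])]),
    ("MA", .nested [("SMA", ["SMA_20", "SMA_50", "SMA_100", "SMA_200"]),
                    ("EMA", ["EMA_20", "EMA_50", "EMA_100", "EMA_200"])]) ]

-- inner loop of A: scan the subgroups of one dict-valued group
def pvFindSub (indicator group_name : String) :
    List (String × List String) → Option (Option String × Option String)
  | [] => none
  | (subgroup_name, indicators) :: rest =>
      if indicators.contains indicator then some (some group_name, some subgroup_name)
      else pvFindSub indicator group_name rest

-- outer loop of A over INDICATOR_GROUPS.items()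
def pvScanGroups (indicator : String) :
    List (String × PyGroup) → Option String × Option String
  | [] => (none, none)
  | (group_name, .nested group) :: rest =>
      match pvFindSub indicator group_name group with
      | some r => r
      | none => pvScanGroups indicator rest
  | (group_name, .flat group) :: rest =>
      if group.contains indicator then (some group_name, none)
      else pvScanGroups indicator rest

def get_indicator_group_and_subgroup (indicator : String) : Option String × Option String :=
  pvScanGroups indicator INDICATOR_GROUPS

-- ===== PORT B =====

-- module-load construction of the flat index _FLAT (transliteration of Source B's loops)
def pvFlatBuild : PySem.Dict String (Option String × Option String) :=
  INDICATOR_GROUPS.foldl (fun d gp =>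
    match gp with
    | (g, .nested grp) =>
        grp.foldl (fun d sp =>
          sp.2.foldl (fun d i => d.insert i (some g, some sp.1)) d) d
    | (g, .flat grp) =>
        grp.foldl (fun d i => d.insert i (some g, none)) d) PySem.Dict.empty

def get_indicator_group_and_subgroup_alt (indicator : String) : Option String × Option String :=
  pvFlatBuild.getD indicator (none, none)

-- ===== PRECONDITION & SPEC =====
def Spec_get_indicator_group_and_subgroup (indicator : String) (out : Option String × Option String) : Prop := out = get_indicator_group_and_subgroup_alt indicator
instance (indicator : String) (out : Option String × Option String) : Decidable (Spec_get_indicator_group_and_subgroup indicator out) := by unfold Spec_get_indicator_group_and_subgroup; infer_instance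

-- ===== CLAIM (what is proved, stated in full; the proofs are below) =====
def Claim_equal_get_indicator_group_and_subgroup : Prop := ∀ (indicator : String), Dom_get_indicator_group_and_subgroup indicator → Spec_get_indicator_group_and_subgroup indicator (get_indicator_group_and_subgroup indicator)

-- ===== LEMMAS AND PROOFS =====

-- the built index, evaluated once to a literal association list
theorem pvFlatBuild_eq : pvFlatBuild = PySem.Dict.mk
    [ ("RSI", (some "RSI", none)),
      ("MACD", (some "MACD", some "MACD")),
      ("MACD_signal", (some "MACD", some "Signal")),
      ("MACD_diff", (some "MACD", some "Histogram")),
      ("BB_high", (some "BB", some "High")),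
      ("BB_mid", (some "BB", some "Mid")),
      ("BB_low", (some "BB", some "Low")),
      ("BB_width", (some "BB", some "Width")),
      ("Stoch_k", (some "Stochastic", some "K")),
      ("Stoch_d", (some "Stochastic", some "D")),
      ("Stoch_diff", (some "Stochastic", some "Difference")),
      ("SMA_20", (some "MA", some "SMA")),
      ("SMA_50", (some "MA", some "SMA")),
      ("SMA_100", (some "MA", some "SMA")),
      ("SMA_200", (some "MA", some "SMA")),
      ("EMA_20", (some "MA", some "EMA")),
      ("EMA_50", (some "MA", some "EMA")),
      ("EMA_100", (some "MA", some "EMA")),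
      ("EMA_200", (some "MA", some "EMA")) ] := by rfl

set_option maxHeartbeats 2000000 in
-- ===== VERDICT (by name: the statement is the Claim_ definition above) =====
theorem get_indicator_group_and_subgroup_spec : Claim_equal_get_indicator_group_and_subgroup := by
  intro indicator _
  show _ = _
  by_cases h0 : indicator = "RSI"
  · subst h0; rfl
  by_cases h1 : indicator = "MACD"
  · subst h1; rfl
  by_cases h2 : indicator = "MACD_signal"
  · subst h2; rfl
  by_cases h3 : indicator = "MACD_diff"
  · subst h3; rfl
  by_cases h4 : indicator = "BB_high"
  · subst h4; rfl
  by_cases h5 : indicator = "BB_mid"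
  · subst h5; rfl
  by_cases h6 : indicator = "BB_low"
  · subst h6; rfl
  by_cases h7 : indicator = "BB_width"
  · subst h7; rfl
  by_cases h8 : indicator = "Stoch_k"
  · subst h8; rfl
  by_cases h9 : indicator = "Stoch_d"
  · subst h9; rfl
  by_cases h10 : indicator = "Stoch_diff"
  · subst h10; rfl
  by_cases h11 : indicator = "SMA_20"
  · subst h11; rfl
  by_cases h12 : indicator = "SMA_50"
  · subst h12; rfl
  by_cases h13 : indicator = "SMA_100"
  · subst h13; rfl
  by_cases h14 : indicator = "SMA_200"
  · subst h14; rfl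
  by_cases h15 : indicator = "EMA_20"
  · subst h15; rfl
  by_cases h16 : indicator = "EMA_50"
  · subst h16; rfl
  by_cases h17 : indicator = "EMA_100"
  · subst h17; rfl
  by_cases h18 : indicator = "EMA_200"
  · subst h18; rfl
  simp only [get_indicator_group_and_subgroup, get_indicator_group_and_subgroup_alt,
    pvFlatBuild_eq, INDICATOR_GROUPS, pvScanGroups, pvFindSub,
    PySem.Dict.getD, List.contains_cons, List.contains_nil,
    PySem.Dict.get?, Bool.or_false, beq_iff_eq]
  simp [List.find?, h0, h1, h2, h3, h4, h5, h6, h7, h8, h9, h10, h11, h12, h13, h14, h15, h16, h17, h18, (show (("RSI" : String) == indicator) = false from beq_eq_false_iff_ne.mpr (Ne.symm h0)), (show (("MACD" : String) == indicator) = false from beq_eq_false_iff_ne.mpr (Ne.symm h1)), (show (("MACD_signal" : String) == indicator) = false from beq_eq_false_iff_ne.mpr (Ne.symm h2)), (show (("MACD_diff" : String) == indicator) = false from beq_eq_false_iff_ne.mpr (Ne.symm h3)), (show (("BB_high" : String) == indicator) = false from beq_eq_false_iff_ne.mpr (Ne.symm h4)), (show (("BB_mid" : String) == indicator) = false from beq_eq_false_iff_ne.mpr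 (Ne.symm h5)), (show (("BB_low" : String) == indicator) = false from beq_eq_false_iff_ne.mpr (Ne.symm h6)), (show (("BB_width" : String) == indicator) = false from beq_eq_false_iff_ne.mpr (Ne.symm h7)), (show (("Stoch_k" : String) == indicator) = false from beq_eq_false_iff_ne.mpr (Ne.symm h8)), (show (("Stoch_d" : String) == indicator) = false from beq_eq_false_iff_ne.mpr (Ne.symm h9)), (show (("Stoch_diff" : String) == indicator) = false from beq_eq_false_iff_ne.mpr (Ne.symm h10)), (show (("SMA_20" : String) == indicator) = false from beq_eq_false_iff_ne.mpr (Ne.symm h11)), (show (("SMA_50" : String) == indicator) = false from beq_eq_false_iff_ne.mpr (Ne.symm h12)), (show (("SMA_100" : String) == indicator) = false from beq_eq_false_iff_ne.mpr (Ne.symm h13)), (show (("SMA_200" : String) == indicator) = false from beq_eq_false_iff_ne.mpr (Ne.symm h14)), (show (("EMA_20" : String) == indicator) = false from beq_eq_false_iff_ne.mpr (Ne.symm h15)), (show (("EMA_50" : String) == indicator) = false from beq_eq_false_iff_ne.mpr (Ne.symm h16)), (show (("EMA_100" : String) == indicator) = false from beq_eq_false_iff_ne.mpr (Ne.symm h17)),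 (show (("EMA_200" : String) == indicator) = false from beq_eq_false_iff_ne.mpr (Ne.symm h18))]
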